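-- pv_equiv track=rewrite | github.com/ronjahoo/leetcode-daily-ish | 010-060226_regular-expression-matching/solution.py | _normalize_pattern
-- ===== SOURCE A (Python) =====
-- def _normalize_pattern(p: str) -> str:
--     # collapse redundant repeats like: a*a*a* -> a*, .*.* -> .*
--     out = []
--     i = 0
--     while i < len(p):
--         if i + 1 < len(p) and p[i + 1] == "*":
--             token = p[i]  # the repeated token
--             # if last token in out is same "token*", skip this one
--             if len(out) >= 2 and out[-2] == token and out[-1] == "*":
--                 i += 2
--                 continue
--             out.append(token)
--             out.append("*")
--             i += 2
--         else:
--             out.append(p[i])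
--             i += 1
--     return "".join(out)
-- ===== SOURCE B (Python) =====
-- def _normalize_pattern(p: str) -> str:
--     # collapse redundant repeats like a*a*a* -> a* by consuming each maximal run
--     # of identical "c*" pairs with a forward scan; the output is never inspected
--     n = len(p)
--     out = []
--     i = 0
--     while i < n:
--         if i + 1 < n and p[i + 1] == "*":
--             c = p[i]
--             i += 2
--             # swallow the rest of the run of identical "c*" pairs
--             while i + 1 < n and p[i] == c and p[i + 1] == "*":
--                 i += 2
--             out.append(c + "*")
--         else:
--             out.append(p[i])
--             i += 1
--     return "".join(out)
-- ===== Notes on version B (the rewrite author's own statement) =====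
-- stated objective: alternative
-- what changed: A emits one token per pair and decides to drop a pair by inspecting the output already built (out[-2]/out[-1] lookback); B never reads its output: it consumes each maximal run of identical 'c*' pairs with an inner forward scan and emits exactly one 'c*' per run (run-collapsing instead of output lookback).
import Mathlib
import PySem

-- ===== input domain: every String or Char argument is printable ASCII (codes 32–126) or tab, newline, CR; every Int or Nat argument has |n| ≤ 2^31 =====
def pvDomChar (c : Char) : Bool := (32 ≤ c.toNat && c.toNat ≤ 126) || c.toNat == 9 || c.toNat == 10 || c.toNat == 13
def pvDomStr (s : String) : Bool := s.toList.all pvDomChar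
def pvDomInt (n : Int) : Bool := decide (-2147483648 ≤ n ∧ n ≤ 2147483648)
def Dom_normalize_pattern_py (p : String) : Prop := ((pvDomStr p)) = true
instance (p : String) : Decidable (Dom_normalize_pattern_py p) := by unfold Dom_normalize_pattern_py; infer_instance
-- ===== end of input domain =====

-- B replaces A's output-lookback (out[-2]/out[-1]) with a forward scan consuming each
-- maximal run of identical "c*" pairs, emitting one token per run; same O(n) cost
-- (objective: alternative).

-- ===== PORT A =====
-- the while loop of A: `out` is the accumulated char list, the second argument the
-- remaining characters p[i:]; `i + 1 < len(p) and p[i+1] == "*"` becomes the match on the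
-- next character
def pvLoopA (out : List Char) : List Char → List Char
  | [] => out
  | [c] => out ++ [c]
  | c :: d :: rest =>
    if d = '*' then
      if 2 ≤ out.length ∧ PySem.List.pyGet? out (-2) = some c ∧ PySem.List.pyGet? out (-1) = some '*' then
        pvLoopA out rest
      else
        pvLoopA (out ++ [c, '*']) rest
    else
      pvLoopA (out ++ [c]) (d :: rest)

def normalize_pattern_py (p : String) : String :=
  String.mk (pvLoopA [] p.toList)

-- ===== PORT B =====
-- B's inner while loop: skip the remaining identical "c*" pairs of the current run
def pvSkipRun (c : Char) : List Char → List Char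
  | a :: b :: rest => if a = c ∧ b = '*' then pvSkipRun c rest else a :: b :: rest
  | l => l

-- needed for the termination of pvLoopB (cited in its decreasing_by)
lemma pvSkipRun_le (c : Char) : ∀ l : List Char, (pvSkipRun c l).length ≤ l.length
  | [] => by simp [pvSkipRun]
  | [a] => by simp [pvSkipRun]
  | a :: b :: rest => by
    rw [pvSkipRun]
    split
    · have := pvSkipRun_le c rest
      simp only [List.length_cons]
      omega
    · simp

-- B's outer while loop: on a "c*" pair, emit it once and continue after the whole run
def pvLoopB : List Char → List Char
  | [] => []
  | [c] => [c]
  | c :: d :: rest =>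
    if d = '*' then c :: '*' :: pvLoopB (pvSkipRun c rest)
    else c :: pvLoopB (d :: rest)
  termination_by l => l.length
  decreasing_by
  · have := pvSkipRun_le c rest
    simp only [List.length_cons]
    omega
  · simp only [List.length_cons]
    omega

def normalize_pattern_py_alt (p : String) : String :=
  String.mk (pvLoopB p.toList)

-- ===== PRECONDITION & SPEC =====
def Spec_normalize_pattern_py (p : String) (out : String) : Prop := out = normalize_pattern_py_alt p
instance (p : String) (out : String) : Decidable (Spec_normalize_pattern_py p out) := by unfold Spec_normalize_pattern_py; infer_instance

-- ===== CLAIM (what is proved, stated in full; the proofs are below) =====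
def Claim_equal_normalize_pattern_py : Prop := ∀ (p : String), Dom_normalize_pattern_py p → Spec_normalize_pattern_py p (normalize_pattern_py p)

-- ===== LEMMAS AND PROOFS =====

-- proof-internal intermediate form: token list (1- or 2-char tokens) with a lookback fold
def pvTokenize : List Char → List (List Char)
  | [] => []
  | [c] => [[c]]
  | c :: d :: rest =>
    if d = '*' then [c, '*'] :: pvTokenize rest
    else [c] :: pvTokenize (d :: rest)

def pvKeepStep (kept : List (List Char)) (t : List Char) : List (List Char) :=
  if t.length = 2 ∧ kept.getLast? = some t then kept else kept ++ [t]

-- invariant coupling the kept-token list with the remaining input: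
-- (1) every kept token is [d] or [d,'*'];
-- (2) if the last kept token is 1-char, the next input char is not '*';
-- (3) if the last two kept tokens are X, ['*'], then X ends in '*'.
def pvInv (kept : List (List Char)) (rest : List Char) : Prop :=
  (∀ t ∈ kept, (∃ d, t = [d]) ∨ (∃ d, t = [d, '*'])) ∧
  (∀ d, kept.getLast? = some [d] → ∀ x ∈ rest.head?, x ≠ '*') ∧
  (∀ ks X, kept = ks ++ [X, ['*']] → X.getLast? = some '*')

-- pyGet? at -2 of a list ending with two given chars
lemma pvGetNegTwo (A : List Char) (x y : Char) :
    PySem.List.pyGet? (A ++ [x, y]) (-2) = some x := by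
  rw [PySem.List.pyGet?_neg_ofNat (A ++ [x, y]) 2 (by omega) (by simp)]
  simp

-- A's skip test on the flattened kept list coincides with the last-kept-token test
lemma pvSkipIff (kept : List (List Char)) (c : Char)
    (h1 : ∀ t ∈ kept, (∃ d, t = [d]) ∨ (∃ d, t = [d, '*']))
    (h2 : kept.getLast? = some ['*'] → c ≠ '*')
    (h3 : ∀ ks X, kept = ks ++ [X, ['*']] → X.getLast? = some '*') :
    (2 ≤ kept.flatten.length ∧ PySem.List.pyGet? kept.flatten (-2) = some c ∧
      PySem.List.pyGet? kept.flatten (-1) = some '*')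
    ↔ kept.getLast? = some [c, '*'] := by
  rcases List.eq_nil_or_concat kept with rfl | ⟨ks, t, rfl⟩
  · simp [PySem.List.pyGet?]
  · simp only [List.concat_eq_append] at h1 h2 h3 ⊢
    have ht := h1 t (by simp)
    rcases ht with ⟨d, rfl⟩ | ⟨d, rfl⟩
    · -- last token is the single char [d]
      by_cases hd : d = '*'
      · subst hd
        have hc : c ≠ '*' := h2 (by simp)
        constructor
        · rintro ⟨hlen, hm2, _⟩
          exfalso
          rcases List.eq_nil_or_concat ks with rfl | ⟨ks', X, rfl⟩
          · simp at hlen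
          · have hX := h3 ks' X (by simp [List.concat_eq_append])
            obtain ⟨X', rfl⟩ := List.getLast?_eq_some_iff.mp hX
            have hflat : ((ks'.concat (X' ++ ['*'])) ++ [['*']]).flatten =
                (ks'.flatten ++ X') ++ ['*', '*'] := by
              simp [List.concat_eq_append]
            rw [hflat, pvGetNegTwo] at hm2
            exact hc (Option.some.inj hm2).symm
        · intro h; simp at h
      · constructor
        · rintro ⟨_, _, hm1⟩
          rw [List.flatten_concat, PySem.List.pyGet?_neg_one] at hm1
          simp at hm1
          exact absurd hm1 hd
        · intro h; simp at h
    · -- last token is the pair [d, '*']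
      constructor
      · rintro ⟨_, hm2, _⟩
        rw [List.flatten_concat, show ks.flatten ++ [d, '*'] = ks.flatten ++ [d, '*'] from rfl,
          pvGetNegTwo] at hm2
        have := Option.some.inj hm2
        subst this
        simp
      · intro h
        have hdc : d = c := by
          rw [List.getLast?_concat] at h
          simpa using h
        have hflat : (ks ++ [[d, '*']]).flatten = ks.flatten ++ [d, '*'] := by simp
        refine ⟨?_, ?_, ?_⟩
        · rw [hflat]; simp
        · rw [hflat, pvGetNegTwo, hdc]
        · rw [hflat, show ks.flatten ++ [d, '*'] = (ks.flatten ++ [d]) ++ ['*'] by simp,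
            PySem.List.pyGet?_neg_one_append_singleton]

-- A's loop equals the tokenize-then-lookback-fold intermediate form
lemma pvMain : ∀ (n : Nat) (rest : List Char), rest.length ≤ n → ∀ kept, pvInv kept rest →
    pvLoopA kept.flatten rest = ((pvTokenize rest).foldl pvKeepStep kept).flatten := by
  intro n
  induction n with
  | zero =>
    intro rest hlen kept _
    have : rest = [] := by cases rest with
      | nil => rfl
      | cons a l => simp at hlen
    subst this
    simp [pvLoopA, pvTokenize]
  | succ n ih =>
    intro rest hlen kept hinv
    match rest with
    | [] => simp [pvLoopA, pvTokenize]
    | [c] =>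
      simp [pvLoopA, pvTokenize, pvKeepStep]
    | c :: d :: rest' =>
      obtain ⟨h1, h2, h3⟩ := hinv
      by_cases hd : d = '*'
      · subst hd
        rw [pvLoopA, pvTokenize]
        simp only [if_true, List.foldl_cons]
        have hskip := pvSkipIff kept c h1
          (fun hl => h2 '*' hl c (by simp)) h3
        by_cases hs : kept.getLast? = some [c, '*']
        · rw [if_pos (hskip.mpr hs)]
          have hks : pvKeepStep kept [c, '*'] = kept := by
            simp [pvKeepStep, hs]
          rw [hks]
          refine ih rest' (by simp at hlen ⊢; omega) kept ⟨h1, ?_, h3⟩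
          intro e he x hx
          rw [hs] at he
          simp at he
        · rw [if_neg (fun hA => hs (hskip.mp hA))]
          have hks : pvKeepStep kept [c, '*'] = kept ++ [[c, '*']] := by
            simp [pvKeepStep, hs]
          rw [hks]
          have hflat : kept.flatten ++ [c, '*'] = (kept ++ [[c, '*']]).flatten := by simp
          rw [hflat]
          refine ih rest' (by simp at hlen ⊢; omega) (kept ++ [[c, '*']]) ⟨?_, ?_, ?_⟩
          · intro t ht
            rcases List.mem_append.mp ht with h | h
            · exact h1 t h
            · simp at h; subst h; exact Or.inr ⟨c, rfl⟩
          · intro e he x hx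
            rw [List.getLast?_concat] at he
            simp at he
          · intro ks X hEq
            exfalso
            have : (kept ++ [[c, '*']]).getLast? = ((ks ++ [X]) ++ [['*']]).getLast? := by
              rw [hEq]; simp
            rw [List.getLast?_concat, List.getLast?_concat] at this
            simp at this
      · rw [pvLoopA, pvTokenize]
        rw [if_neg hd, if_neg hd]
        rw [List.foldl_cons]
        have hks : pvKeepStep kept [c] = kept ++ [[c]] := by
          simp [pvKeepStep]
        rw [hks]
        have hflat : kept.flatten ++ [c] = (kept ++ [[c]]).flatten := by simp
        rw [hflat]
        refine ih (d :: rest') (by simp at hlen ⊢; omega) (kept ++ [[c]]) ⟨?_, ?_, ?_⟩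
        · intro t ht
          rcases List.mem_append.mp ht with h | h
          · exact h1 t h
          · simp at h; subst h; exact Or.inl ⟨c, rfl⟩
        · intro e he x hx
          simp at hx; subst hx
          exact hd
        · intro ks X hEq
          have hlast : (kept ++ [[c]]).getLast? = ((ks ++ [X]) ++ [['*']]).getLast? := by
            rw [hEq]; simp
          rw [List.getLast?_concat, List.getLast?_concat] at hlast
          have hc : [c] = ['*'] := Option.some.inj hlast
          injection hc with hc' _
          subst hc'
          have hkeq : kept = ks ++ [X] := by
            have := hEq
            rw [show ks ++ [X, ['*']] = (ks ++ [X]) ++ [['*']] by simp] at this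
            exact List.append_inj_left' this (by simp)
          have hXmem : X ∈ kept := by rw [hkeq]; simp
          rcases h1 X hXmem with ⟨e, rfl⟩ | ⟨e, rfl⟩
          · exfalso
            exact h2 e (by rw [hkeq, List.getLast?_concat]) '*' (by simp) rfl
          · simp

-- skipping a run of "c*" pairs is invisible to the fold once [c,'*'] is the last kept token
lemma pvSkipTok (c : Char) : ∀ (l : List Char) (kept : List (List Char)),
    kept.getLast? = some [c, '*'] →
    (pvTokenize l).foldl pvKeepStep kept = (pvTokenize (pvSkipRun c l)).foldl pvKeepStep kept
  | [], _, _ => by simp [pvSkipRun]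
  | [a], _, _ => by simp [pvSkipRun]
  | a :: b :: rest, kept, hk => by
    rw [pvSkipRun]
    split
    · rename_i hab
      obtain ⟨h1, h2⟩ := hab
      subst h1; subst h2
      rw [pvTokenize, if_pos rfl, List.foldl_cons,
        show pvKeepStep kept [a, '*'] = kept by simp [pvKeepStep, hk]]
      exact pvSkipTok a rest kept hk
    · rfl

-- the pair at the head of pvSkipRun's result never matches the skipped token
lemma pvSkipRun_head (c : Char) : ∀ (l : List Char) (a : Char) (rest' : List Char),
    pvSkipRun c l = a :: '*' :: rest' → a ≠ c
  | [], a, rest', h => by simp [pvSkipRun] at h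
  | [x], a, rest', h => by simp [pvSkipRun] at h
  | x :: y :: rest, a, rest', h => by
    rw [pvSkipRun] at h
    split at h
    · exact pvSkipRun_head c rest a rest' h
    · rename_i hxy
      rcases h with ⟨rfl, rfl, rfl⟩
      intro hac
      exact hxy ⟨hac, rfl⟩

-- the lookback fold equals B's run-skipping loop
lemma pvB_eq : ∀ (n : Nat) (l : List Char), l.length ≤ n →
    ∀ kept : List (List Char),
    (∀ c rest, l = c :: '*' :: rest → kept.getLast? ≠ some [c, '*']) →
    ((pvTokenize l).foldl pvKeepStep kept).flatten = kept.flatten ++ pvLoopB l := by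
  intro n
  induction n with
  | zero =>
    intro l hlen kept _
    have : l = [] := by cases l with
      | nil => rfl
      | cons a t => simp at hlen
    subst this
    simp [pvTokenize, pvLoopB]
  | succ n ih =>
    intro l hlen kept hnt
    match l with
    | [] => simp [pvTokenize, pvLoopB]
    | [c] =>
      simp [pvTokenize, pvLoopB, pvKeepStep]
    | c :: d :: rest =>
      by_cases hd : d = '*'
      · subst hd
        rw [pvTokenize, if_pos rfl, List.foldl_cons]
        have hks : pvKeepStep kept [c, '*'] = kept ++ [[c, '*']] := by
          simp only [pvKeepStep]
          rw [if_neg]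
          rintro ⟨_, h⟩
          exact hnt c rest rfl h
        rw [hks, pvSkipTok c rest (kept ++ [[c, '*']]) (by rw [List.getLast?_concat])]
        have hlen' : (pvSkipRun c rest).length ≤ n := by
          have := pvSkipRun_le c rest
          simp at hlen
          omega
        rw [ih (pvSkipRun c rest) hlen' (kept ++ [[c, '*']]) ?_]
        · rw [pvLoopB, if_pos rfl]
          simp
        · intro a rest'' heq
          rw [List.getLast?_concat]
          intro hsome
          have : c = a := by
            have := Option.some.inj hsome
            injection this with h1 _
          exact pvSkipRun_head c rest a rest'' heq this.symm
      · rw [pvTokenize, if_neg hd, List.foldl_cons]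
        have hks : pvKeepStep kept [c] = kept ++ [[c]] := by
          simp [pvKeepStep]
        rw [hks, ih (d :: rest) (by simp at hlen ⊢; omega) (kept ++ [[c]]) ?_]
        · rw [pvLoopB, if_neg hd]
          simp
        · intro a rest'' heq
          rw [List.getLast?_concat]
          intro hsome
          have := Option.some.inj hsome
          simp at this

theorem pvFinal (p : String) : normalize_pattern_py p = normalize_pattern_py_alt p := by
  have h := pvMain p.toList.length p.toList le_rfl [] (by
    refine ⟨by simp, by simp, by simp⟩)
  have h2 := pvB_eq p.toList.length p.toList le_rfl [] (by intro c rest _ hk; simp at hk)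
  unfold normalize_pattern_py normalize_pattern_py_alt
  rw [show ([] : List Char) = (([] : List (List Char)).flatten) from rfl, h, h2]
  simp

-- ===== VERDICT (by name: the statement is the Claim_ definition above) =====
theorem normalize_pattern_py_spec : Claim_equal_normalize_pattern_py := by
  intro p _
  unfold Spec_normalize_pattern_py
  exact pvFinal p
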